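-- pv_equiv track=rewrite | github.com/idrismmc/Coursework-Projects | Face-Recognition-master/task3.py | find3min
-- ===== SOURCE A (Python) =====
-- def find3min(a):
--     firstmin = float('inf')
--     secondmin = float('inf')
--     thirdmin = float('inf')
--     firstin = 0
--     secondin = 0
--     thirdin = 0
--     for i in range(len(a)):
--         if a[i]<firstmin:
--             thirdmin = secondmin
--             secondmin=firstmin
--             firstmin = a[i]
--             thirdin = secondin
--             secondin=firstin
--             firstin = i
--         elif a[i]<secondmin:
--             thirdmin = secondmin
--             secondmin = a[i]
--             thirdin = secondin
--             secondin = i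
--         elif a[i]<thirdmin:
--             thirdmin = a[i]
--             thirdin = i
--     return firstin,secondin,thirdin
-- ===== SOURCE B (Python) =====
-- def find3min(a):
--     order = sorted(range(len(a)), key=lambda i: a[i])
--     res = [0, 0, 0]
--     for j in range(min(3, len(a))):
--         res[j] = order[j]
--     return res[0], res[1], res[2]
-- ===== Notes on version B (the rewrite author's own statement) =====
-- stated objective: simpler
-- what changed: Replaces the hand-maintained six-variable running-minimum cascade with a stable sort of the index range by value and taking the first three indices (zero-filled when fewer than three elements).
import Mathlib
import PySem

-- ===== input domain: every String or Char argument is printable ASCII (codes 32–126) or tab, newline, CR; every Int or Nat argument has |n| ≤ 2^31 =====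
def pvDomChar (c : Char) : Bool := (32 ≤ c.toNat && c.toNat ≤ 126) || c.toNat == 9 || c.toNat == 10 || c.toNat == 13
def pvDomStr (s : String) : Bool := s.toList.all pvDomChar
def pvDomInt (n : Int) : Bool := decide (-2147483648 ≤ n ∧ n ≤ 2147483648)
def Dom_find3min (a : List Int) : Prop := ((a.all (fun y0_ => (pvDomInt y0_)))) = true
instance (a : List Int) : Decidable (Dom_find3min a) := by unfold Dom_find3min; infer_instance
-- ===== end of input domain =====

-- B replaces A's six-variable running-minimum cascade by a stable sort of the index
-- range by value, taking the first three indices (slots stay 0 when len(a) < 3).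

-- ===== PORT A =====
-- float('inf') is modeled as `none : Option Int` (exact: every int compares below inf,
-- and the running minima, once set, are ints from the list).
def pvLtInf (x : Int) (m : Option Int) : Bool :=
  match m with
  | none => true
  | some v => decide (x < v)

-- the body of A's `for i in range(len(a))` loop over the state (firstmin, secondmin, thirdmin, firstin, secondin, thirdin)
def pvStep (a : List Int) (st : Option Int × Option Int × Option Int × Int × Int × Int)
    (i : Nat) : Option Int × Option Int × Option Int × Int × Int × Int :=
  match st with
  | (fm, sm, tm, fi, si, ti) =>
    let x := a.getD i 0   -- a[i]; i ∈ range(len a), in range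
    if pvLtInf x fm then (some x, fm, sm, (i : Int), fi, si)
    else if pvLtInf x sm then (fm, some x, sm, fi, (i : Int), si)
    else if pvLtInf x tm then (fm, sm, some x, fi, si, (i : Int))
    else (fm, sm, tm, fi, si, ti)

def find3min (a : List Int) : Int × Int × Int :=
  ((List.range a.length).foldl (pvStep a) (none, none, none, 0, 0, 0)).2.2.2

-- ===== PORT B =====
-- order = sorted(range(len(a)), key=lambda i: a[i])
def pvOrder (a : List Int) : List Nat :=
  PySem.List.sorted (List.range a.length) (fun i => a.getD i 0) false

-- res = [0,0,0]; for j in range(min(3, len(a))): res[j] = order[j]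
def pvRes (a : List Int) : List Int :=
  (List.range (min 3 a.length)).foldl
    (fun (res : List Int) j => res.set j (((pvOrder a).getD j 0 : Nat) : Int)) [0, 0, 0]

def find3min_alt (a : List Int) : Int × Int × Int :=
  ((pvRes a).getD 0 0, (pvRes a).getD 1 0, (pvRes a).getD 2 0)

-- ===== PRECONDITION & SPEC =====
def Spec_find3min (a : List Int) (out : Int × Int × Int) : Prop := out = find3min_alt a
instance (a : List Int) (out : Int × Int × Int) : Decidable (Spec_find3min a out) := by unfold Spec_find3min; infer_instance

-- ===== CLAIM (what is proved, stated in full; the proofs are below) =====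
def Claim_equal_find3min : Prop := ∀ (a : List Int), Dom_find3min a → Spec_find3min a (find3min a)

-- ===== LEMMAS AND PROOFS =====

-- A's loop state, read off the stably sorted index list s (sorted by value):
-- the three minima are the keys of s[0..2] (none = inf when absent), the three indices are s[0..2] (0 when absent).
def pvStateOf (a : List Int) (s : List Nat) : Option Int × Option Int × Option Int × Int × Int × Int :=
  ((s[0]?).map (fun i => a.getD i 0), (s[1]?).map (fun i => a.getD i 0), (s[2]?).map (fun i => a.getD i 0),
   ((s.getD 0 0 : Nat) : Int), ((s.getD 1 0 : Nat) : Int), ((s.getD 2 0 : Nat) : Int))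

-- one cascade step of A = one stable insertion into the sorted index list
lemma pvStep_insertBy (a : List Int) (i : Nat) (s : List Nat) :
    pvStep a (pvStateOf a s) i
      = pvStateOf a (PySem.List.insertBy (fun p q => decide (a.getD p 0 < a.getD q 0)) i s) := by
  match s with
  | [] => simp [pvStep, pvStateOf, PySem.List.insertBy, pvLtInf]
  | [b] =>
    simp only [pvStep, pvStateOf, PySem.List.insertBy, pvLtInf]
    split_ifs <;> simp_all <;> omega
  | [b, c] =>
    simp only [pvStep, pvStateOf, PySem.List.insertBy, pvLtInf]
    split_ifs <;> simp_all <;> omega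
  | b :: c :: d :: t =>
    simp only [pvStep, pvStateOf, PySem.List.insertBy, pvLtInf]
    split_ifs <;> simp_all <;> omega

-- loop invariant: A's fold over range(n) is the state read off sorted(range(n), key)
lemma pvLoop_eq_sorted (a : List Int) (n : Nat) :
    (List.range n).foldl (pvStep a) (none, none, none, 0, 0, 0)
      = pvStateOf a (PySem.List.sorted (List.range n) (fun i => a.getD i 0) false) := by
  induction n with
  | zero => simp [pvStateOf, PySem.List.sorted_eq_foldl_insertBy]
  | succ n ih =>
    rw [List.range_succ, List.foldl_append, ih,
        PySem.List.sorted_eq_foldl_insertBy, PySem.List.sorted_eq_foldl_insertBy,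
        List.foldl_append]
    simp only [List.foldl_cons, List.foldl_nil]
    rw [← PySem.List.sorted_eq_foldl_insertBy, pvStep_insertBy]

-- B's res-filling loop yields exactly the first three entries of order, 0-padded
lemma pvRes_fill (order : List Nat) (n : Nat) (h : order.length = n) :
    (List.range (min 3 n)).foldl
        (fun (res : List Int) j => res.set j ((order.getD j 0 : Nat) : Int)) [0, 0, 0]
      = [((order.getD 0 0 : Nat) : Int), ((order.getD 1 0 : Nat) : Int), ((order.getD 2 0 : Nat) : Int)] := by
  subst h
  match order with
  | [] => simp
  | [b] => simp [List.range_succ]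
  | [b, c] => simp [List.range_succ]
  | b :: c :: d :: t =>
    have h : min 3 (b :: c :: d :: t).length = 3 := by simp
    rw [h]
    simp [List.range_succ]

-- ===== VERDICT (by name: the statement is the Claim_ definition above) =====
theorem find3min_spec : Claim_equal_find3min := by
  intro a _
  unfold Spec_find3min find3min find3min_alt pvRes pvOrder
  have hl : (PySem.List.sorted (List.range a.length) (fun i => a.getD i 0) false).length
      = a.length := by
    rw [PySem.List.length_sorted]; simp
  rw [pvLoop_eq_sorted, pvRes_fill _ _ hl]
  simp [pvStateOf]
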